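-- pv_equiv track=rewrite | github.com/chipsalliance/rocket-chip | scripts/check_comparator_trace.py | expand_wmask
-- ===== SOURCE A (Python) =====
-- N_BYTES = 8
--
-- def expand_wmask(wmask):
--     bitmask = 0
--     bitmask_byte = 0xff
--
--     for i in range(0, N_BYTES):
--         if ((wmask >> i) & 1) == 1:
--             bitmask |= bitmask_byte
--         bitmask_byte <<= 8
--
--     return bitmask
-- ===== SOURCE B (Python) =====
-- def expand_wmask(wmask):
--     m = wmask & 0xFF
--     spread = (m * 0x0101010101010101) & 0x8040201008040201
--     high = (spread + 0x7F7F7F7F7F7F7F7F) & 0x8080808080808080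
--     return (high >> 7) * 0xFF
-- ===== Notes on version B (the rewrite author's own statement) =====
-- stated objective: alternative
-- what changed: Replaced the per-bit test-and-shift loop (one iteration per byte lane) with a loop-free closed-form bit broadcast: mask to the low byte, multiply-broadcast it into all eight byte lanes, AND with a diagonal constant so byte j keeps only bit j, then saturate each nonzero byte to 0xFF.
import Mathlib
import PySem

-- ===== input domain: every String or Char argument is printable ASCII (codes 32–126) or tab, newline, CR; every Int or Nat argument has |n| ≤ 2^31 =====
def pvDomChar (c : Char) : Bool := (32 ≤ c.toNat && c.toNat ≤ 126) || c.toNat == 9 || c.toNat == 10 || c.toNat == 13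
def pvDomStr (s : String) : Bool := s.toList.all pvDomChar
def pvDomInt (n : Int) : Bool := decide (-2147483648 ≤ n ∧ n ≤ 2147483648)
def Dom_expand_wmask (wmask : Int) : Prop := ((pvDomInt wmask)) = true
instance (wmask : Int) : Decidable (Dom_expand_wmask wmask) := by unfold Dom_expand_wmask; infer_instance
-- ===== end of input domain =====

-- B replaces A's per-bit loop by a closed-form bit broadcast
-- (multiply-spread, per-byte saturate); objective: alternative (loop-free), same cost class.

-- ===== PORT A =====
-- literal port of A: fold over range(0, 8) carrying (bitmask, bitmask_byte)
def expand_wmask (wmask : Int) : Int :=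
  ((PySem.List.pyRange 0 8 1).foldl
    (fun (s : Int × Int) (i : Int) =>
      (if PySem.Int.band (wmask >>> i.toNat) 1 == 1 then PySem.Int.bor s.1 s.2 else s.1,
       s.2 <<< 8))
    (0, 0xff)).1

-- ===== PORT B =====
-- literal port of Source B: mask, broadcast-multiply, select diagonal bits, per-byte saturate
def expand_wmask_alt (wmask : Int) : Int :=
  let m := PySem.Int.band wmask 0xFF
  let spread := PySem.Int.band (m * 0x0101010101010101) 0x8040201008040201
  let high := PySem.Int.band (spread + 0x7F7F7F7F7F7F7F7F) 0x8080808080808080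
  (high >>> 7) * 0xFF

-- ===== PRECONDITION & SPEC =====
def Spec_expand_wmask (wmask : Int) (out : Int) : Prop := out = expand_wmask_alt wmask
instance (wmask : Int) (out : Int) : Decidable (Spec_expand_wmask wmask out) := by unfold Spec_expand_wmask; infer_instance

-- ===== CLAIM (what is proved, stated in full; the proofs are below) =====
def Claim_equal_expand_wmask : Prop := ∀ (wmask : Int), Dom_expand_wmask wmask → Spec_expand_wmask wmask (expand_wmask wmask)

-- ===== LEMMAS AND PROOFS =====

-- Python's w & 255 is w mod 256 (both signs).
theorem pv_band_255 (w : Int) : PySem.Int.band w 255 = w % 256 := by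
  unfold PySem.Int.band
  have hnat : ∀ n : Nat, n &&& (255:Int).toNat = n % 256 := fun n => by
    simpa using Nat.and_two_pow_sub_one_eq_mod n 8
  split_ifs with h h2 h3
  · rw [hnat]; omega
  · exact absurd (by norm_num : (0:Int) ≤ 255) h2
  · have h1 : (255:Int).toNat &&& (-w - 1).toNat = (-w - 1).toNat % 256 := by
      rw [Nat.and_comm]; exact hnat _
    rw [h1]; omega
  · exact absurd (by norm_num : (0:Int) ≤ 255) h3

-- Bit i of w (i < 8) only depends on w mod 256.
theorem pv_bit_mod (w : Int) (i : Nat) (hi : i < 8) :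
    PySem.Int.band (w >>> i) 1 = PySem.Int.band ((w % 256) >>> i) 1 := by
  rw [PySem.Int.band_one, PySem.Int.band_one]
  unfold PySem.Int.mod
  simp only [Int.fmod_eq_emod]
  rw [Int.shiftRight_eq_div_pow, Int.shiftRight_eq_div_pow]
  interval_cases i <;> norm_num <;> omega

-- A only depends on w mod 256.
theorem pv_A_mod (w : Int) : expand_wmask w = expand_wmask (w % 256) := by
  unfold expand_wmask
  have hr : PySem.List.pyRange 0 8 1 = [0,1,2,3,4,5,6,7] := by decide
  rw [hr]
  simp only [List.foldl]
  simp only [show Int.toNat 0 = 0 from rfl, show Int.toNat 1 = 1 from rfl,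
    show Int.toNat 2 = 2 from rfl, show Int.toNat 3 = 3 from rfl,
    show Int.toNat 4 = 4 from rfl, show Int.toNat 5 = 5 from rfl,
    show Int.toNat 6 = 6 from rfl, show Int.toNat 7 = 7 from rfl]
  rw [pv_bit_mod w 0 (by norm_num), pv_bit_mod w 1 (by norm_num),
      pv_bit_mod w 2 (by norm_num), pv_bit_mod w 3 (by norm_num),
      pv_bit_mod w 4 (by norm_num), pv_bit_mod w 5 (by norm_num),
      pv_bit_mod w 6 (by norm_num), pv_bit_mod w 7 (by norm_num)]

-- B only depends on w mod 256.
theorem pv_B_mod (w : Int) : expand_wmask_alt w = expand_wmask_alt (w % 256) := by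
  unfold expand_wmask_alt
  rw [show ((0xFF : Int)) = 255 from rfl, pv_band_255, pv_band_255, Int.emod_emod_of_dvd _ (by norm_num)]

-- The 256 residues, checked by kernel evaluation.
set_option maxRecDepth 8192 in
theorem pv_key : ∀ r : Fin 256, expand_wmask (r : Int) = expand_wmask_alt (r : Int) := by decide

-- ===== VERDICT (by name: the statement is the Claim_ definition above) =====
theorem expand_wmask_spec : Claim_equal_expand_wmask := by
  intro w _
  unfold Spec_expand_wmask
  rw [pv_A_mod, pv_B_mod]
  have h0 : 0 ≤ w % 256 := Int.emod_nonneg _ (by norm_num)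
  have h1 : w % 256 < 256 := Int.emod_lt_of_pos _ (by norm_num)
  have : w % 256 = ((⟨(w % 256).toNat, by omega⟩ : Fin 256) : Int) := by simp; omega
  rw [this, pv_key]
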